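-- pv_equiv track=rewrite | github.com/becherd/DBnormalizer | DBnormalizer.py | removeRedundantSchemas
-- ===== SOURCE A (Python) =====
-- def removeRedundantSchemas(relations):
-- 	removeIndexes = set()
--
-- 	for i in range(len(relations)):
-- 		for j in range(len(relations)):
-- 			if (i != j) and (relations[i] < relations[j]):
-- 				removeIndexes.add(i)
-- 			elif (i > j) and (relations[i] == relations[j]):
-- 				removeIndexes.add(i)
-- 	newRelations = []
-- 	for i in range(len(relations)):
-- 		if i not in removeIndexes:
-- 			newRelations.append(relations[i])
-- 	return newRelations
-- ===== SOURCE B (Python) =====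
-- def removeRedundantSchemas(relations):
--     # Single pass keeping a frontier of surviving relations: a new relation is
--     # dropped if it is contained in (or equal to) a survivor; otherwise it evicts
--     # the survivors that are proper subsets of it and joins the frontier.
--     kept = []
--     for s in relations:
--         if not any(s <= t for t in kept):
--             kept = [t for t in kept if not t < s]
--             kept.append(s)
--     return kept
-- ===== Notes on version B (the rewrite author's own statement) =====
-- stated objective: alternative
-- what changed: A marks removal indices with an all-pairs index scan (every i against every j, plus a duplicate check against earlier j) and then filters by index; B makes one pass that maintains a frontier of surviving sets, dropping a new set contained in (or equal to) a survivor and evicting survivors that are proper subsets of it.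
import Mathlib
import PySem

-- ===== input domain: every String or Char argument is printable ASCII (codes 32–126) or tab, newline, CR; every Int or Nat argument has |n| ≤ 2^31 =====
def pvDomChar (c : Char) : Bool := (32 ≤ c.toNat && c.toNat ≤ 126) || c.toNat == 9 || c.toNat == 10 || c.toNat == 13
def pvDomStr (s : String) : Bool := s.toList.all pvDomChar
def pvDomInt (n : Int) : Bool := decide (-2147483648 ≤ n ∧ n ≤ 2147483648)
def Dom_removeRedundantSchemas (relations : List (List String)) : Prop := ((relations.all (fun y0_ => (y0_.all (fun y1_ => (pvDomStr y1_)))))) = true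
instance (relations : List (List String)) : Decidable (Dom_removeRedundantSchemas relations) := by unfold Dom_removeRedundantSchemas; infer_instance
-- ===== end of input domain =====

-- B replaces A's O(n^2) all-pairs index scan by a single pass that maintains a frontier
-- of surviving relations (drop a new set contained in a survivor, evict survivors that
-- are proper subsets of the new set); objective: alternative.

-- ===== PORT A =====
-- Python's `<` on sets: proper subset (s <= t and s != t). Exact via PySem.Set.
def pySetLt (a b : List String) : Bool :=
  PySem.Set.issubset a b && !(PySem.Set.equal a b)

def removeRedundantSchemas (relations : List (List String)) : List (List String) :=
  let removeIndexes : PySem.Set Int :=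
    (PySem.List.pyRange 0 (PySem.List.len relations) 1).foldl (fun ri i =>
      (PySem.List.pyRange 0 (PySem.List.len relations) 1).foldl (fun ri j =>
        if i ≠ j ∧ pySetLt (PySem.List.pyGetD relations i []) (PySem.List.pyGetD relations j []) then
          PySem.Set.add ri i
        else if i > j ∧ PySem.Set.equal (PySem.List.pyGetD relations i []) (PySem.List.pyGetD relations j []) then
          PySem.Set.add ri i
        else ri) ri) PySem.Set.empty
  (PySem.List.pyRange 0 (PySem.List.len relations) 1).foldl (fun newRelations i =>
    if ¬ (PySem.Set.contains removeIndexes i = true) then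
      newRelations ++ [PySem.List.pyGetD relations i []]
    else newRelations) []

-- ===== PORT B =====
-- the loop body of Source B: drop s if it is ⊆ a survivor, else evict survivors ⊊ s and keep s
def pvStepB (kept : List (List String)) (s : List String) : List (List String) :=
  if kept.any (fun t => PySem.Set.issubset s t) then kept
  else kept.filter (fun t => !(pySetLt t s)) ++ [s]

def removeRedundantSchemas_alt (relations : List (List String)) : List (List String) :=
  relations.foldl pvStepB []

-- ===== PRECONDITION & SPEC =====
def Spec_removeRedundantSchemas (relations : List (List String)) (out : List (List String)) : Prop := out = removeRedundantSchemas_alt relations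
instance (relations : List (List String)) (out : List (List String)) : Decidable (Spec_removeRedundantSchemas relations out) := by unfold Spec_removeRedundantSchemas; infer_instance

-- ===== CLAIM (what is proved, stated in full; the proofs are below) =====
def Claim_equal_removeRedundantSchemas : Prop := ∀ (relations : List (List String)), Dom_removeRedundantSchemas relations → Spec_removeRedundantSchemas relations (removeRedundantSchemas relations)

-- ===== LEMMAS AND PROOFS =====

-- ---- set relations at the Prop level ----
def pvSub (a b : List String) : Prop := ∀ x ∈ a, x ∈ b
def pvEqv (a b : List String) : Prop := ∀ x, x ∈ a ↔ x ∈ b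
def pvLt (a b : List String) : Prop := pvSub a b ∧ ¬ pvEqv a b

theorem pvSub_bridge (a b : List String) : PySem.Set.issubset a b = true ↔ pvSub a b :=
  PySem.Set.issubset_iff a b

theorem pvEqv_bridge (a b : List String) : PySem.Set.equal a b = true ↔ pvEqv a b :=
  PySem.Set.equal_iff a b

theorem pvLt_bridge (a b : List String) : pySetLt a b = true ↔ pvLt a b := by
  unfold pySetLt pvLt
  rw [Bool.and_eq_true]
  constructor
  · rintro ⟨h1, h2⟩
    refine ⟨(pvSub_bridge a b).mp h1, fun he => ?_⟩
    rw [(pvEqv_bridge a b).mpr he] at h2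
    cases h2
  · rintro ⟨h1, h2⟩
    refine ⟨(pvSub_bridge a b).mpr h1, ?_⟩
    cases he : PySem.Set.equal a b
    · rfl
    · exact absurd ((pvEqv_bridge a b).mp he) h2

theorem pvSub_refl (a : List String) : pvSub a a := fun _ hx => hx

theorem pvSub_trans {a b c : List String} (h1 : pvSub a b) (h2 : pvSub b c) : pvSub a c :=
  fun x hx => h2 x (h1 x hx)

theorem pvSub_of_eqv {a b : List String} (h : pvEqv a b) : pvSub a b := fun x hx => (h x).mp hx

theorem pvEqv_of_sub_sub {a b : List String} (h1 : pvSub a b) (h2 : pvSub b a) : pvEqv a b :=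
  fun x => ⟨h1 x, h2 x⟩

theorem pvLt_irrefl (a : List String) : ¬ pvLt a a := fun h => h.2 (fun _ => Iff.rfl)

theorem pvLt_of_lt_of_sub {a b c : List String} (h1 : pvLt a b) (h2 : pvSub b c) : pvLt a c := by
  refine ⟨pvSub_trans h1.1 h2, fun he => ?_⟩
  exact h1.2 (pvEqv_of_sub_sub h1.1 (pvSub_trans h2 (pvSub_of_eqv (fun x => (he x).symm))))

theorem pvSub_cases {a b : List String} (h : pvSub a b) : pvLt a b ∨ pvEqv a b := by
  by_cases he : pvEqv a b
  · exact Or.inr he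
  · exact Or.inl ⟨h, he⟩

theorem pvBoolExt {a b : Bool} (h : a = true ↔ b = true) : a = b := by
  cases a <;> cases b <;> simp_all

-- ---- characterizing A's removal set and output ----
def pvCnd (l : List (List String)) (i j : ℕ) : Bool :=
  (decide (i ≠ j) && pySetLt (l.getD i []) (l.getD j [])) ||
    (decide (j < i) && PySem.Set.equal (l.getD i []) (l.getD j []))

def pvKeep (l : List (List String)) (i : ℕ) : Bool :=
  !(List.range l.length).any (pvCnd l i)

theorem cnd_bridge (l : List (List String)) (i j : ℕ) :
    (((i : ℤ) ≠ (j : ℤ) ∧ pySetLt (PySem.List.pyGetD l (i : ℤ) []) (PySem.List.pyGetD l (j : ℤ) []) = true) ∨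
      ((i : ℤ) > (j : ℤ) ∧ PySem.Set.equal (PySem.List.pyGetD l (i : ℤ) []) (PySem.List.pyGetD l (j : ℤ) []) = true)) ↔
      pvCnd l i j = true := by
  unfold pvCnd
  simp only [PySem.List.pyGetD_natCast, Bool.or_eq_true, Bool.and_eq_true, decide_eq_true_eq,
    ne_eq, Nat.cast_inj, gt_iff_lt, Nat.cast_lt]

theorem pvCnd_iff (l : List (List String)) (i j : ℕ) :
    pvCnd l i j = true ↔
      (i ≠ j ∧ pvLt (l.getD i []) (l.getD j [])) ∨ (j < i ∧ pvEqv (l.getD i []) (l.getD j [])) := by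
  unfold pvCnd
  simp only [Bool.or_eq_true, Bool.and_eq_true, decide_eq_true_eq, pvLt_bridge, pvEqv_bridge]

theorem pvKeep_iff (l : List (List String)) (i : ℕ) (hi : i < l.length) :
    pvKeep l i = true ↔
      (∀ j, j < l.length → ¬ pvLt (l.getD i []) (l.getD j [])) ∧
        (∀ j, j < i → ¬ pvEqv (l.getD i []) (l.getD j [])) := by
  unfold pvKeep
  rw [Bool.not_eq_eq_eq_not, Bool.not_true, List.any_eq_false]
  constructor
  · intro h
    constructor
    · intro j hj hlt
      by_cases hij : i = j
      · subst hij; exact pvLt_irrefl _ hlt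
      · have hf : ¬ (pvCnd l i j = true) := by simp [h j (List.mem_range.mpr hj)]
        exact hf ((pvCnd_iff l i j).mpr (Or.inl ⟨hij, hlt⟩))
    · intro j hj heq
      have hjn : j < l.length := lt_trans hj hi
      have hf : ¬ (pvCnd l i j = true) := by simp [h j (List.mem_range.mpr hjn)]
      exact hf ((pvCnd_iff l i j).mpr (Or.inr ⟨hj, heq⟩))
  · intro h j hjmem
    cases hcv : pvCnd l i j with
    | false => simp
    | true =>
      exfalso
      rcases (pvCnd_iff l i j).mp hcv with ⟨_, hlt⟩ | ⟨hji, heq⟩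
      · exact h.1 j (List.mem_range.mp hjmem) hlt
      · exact h.2 j hji heq

theorem mem_foldl_addif2 (L : List ℤ) (P Q : ℤ → Prop) [DecidablePred P] [DecidablePred Q]
    (v : ℤ) (s : PySem.Set ℤ) (x : ℤ) :
    (x ∈ L.foldl (fun s j => if P j then PySem.Set.add s v else if Q j then PySem.Set.add s v else s) s) ↔
      x ∈ s ∨ ((∃ j ∈ L, P j ∨ Q j) ∧ x = v) := by
  induction L generalizing s with
  | nil => simp
  | cons a L ih =>
    simp only [List.foldl_cons]
    by_cases h1 : P a
    · rw [if_pos h1, ih]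
      simp only [PySem.Set.mem_add, List.mem_cons]
      constructor
      · rintro ((h | h) | ⟨⟨j, hj, hpq⟩, hx⟩)
        · exact Or.inl h
        · exact Or.inr ⟨⟨a, Or.inl rfl, Or.inl h1⟩, h⟩
        · exact Or.inr ⟨⟨j, Or.inr hj, hpq⟩, hx⟩
      · rintro (h | ⟨⟨j, hj, hpq⟩, hx⟩)
        · exact Or.inl (Or.inl h)
        · exact Or.inl (Or.inr hx)
    · rw [if_neg h1]
      by_cases h2 : Q a
      · rw [if_pos h2, ih]
        simp only [PySem.Set.mem_add, List.mem_cons]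
        constructor
        · rintro ((h | h) | ⟨⟨j, hj, hpq⟩, hx⟩)
          · exact Or.inl h
          · exact Or.inr ⟨⟨a, Or.inl rfl, Or.inr h2⟩, h⟩
          · exact Or.inr ⟨⟨j, Or.inr hj, hpq⟩, hx⟩
        · rintro (h | ⟨⟨j, hj, hpq⟩, hx⟩)
          · exact Or.inl (Or.inl h)
          · exact Or.inl (Or.inr hx)
      · rw [if_neg h2, ih]
        constructor
        · rintro (h | ⟨⟨j, hj, hpq⟩, hx⟩)
          · exact Or.inl h
          · exact Or.inr ⟨⟨j, List.mem_cons_of_mem _ hj, hpq⟩, hx⟩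
        · rintro (h | ⟨⟨j, hj, hpq⟩, hx⟩)
          · exact Or.inl h
          · rcases List.mem_cons.mp hj with rfl | hj
            · rcases hpq with h | h
              · exact absurd h h1
              · exact absurd h h2
            · exact Or.inr ⟨⟨j, hj, hpq⟩, hx⟩

theorem mem_foldl_outer2 (L1 L2 : List ℤ) (P Q : ℤ → ℤ → Prop)
    [∀ i j, Decidable (P i j)] [∀ i j, Decidable (Q i j)]
    (s0 : PySem.Set ℤ) (x : ℤ) :
    (x ∈ L1.foldl (fun s i =>
        L2.foldl (fun s j => if P i j then PySem.Set.add s i else if Q i j then PySem.Set.add s i else s) s) s0) ↔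
      x ∈ s0 ∨ ∃ i ∈ L1, (∃ j ∈ L2, P i j ∨ Q i j) ∧ x = i := by
  induction L1 generalizing s0 with
  | nil => simp
  | cons a L1 ih =>
    simp only [List.foldl_cons]
    rw [ih, mem_foldl_addif2]
    constructor
    · rintro ((h | h) | ⟨i, hi, hh⟩)
      · exact Or.inl h
      · exact Or.inr ⟨a, List.mem_cons_self, h⟩
      · exact Or.inr ⟨i, List.mem_cons_of_mem _ hi, hh⟩
    · rintro (h | ⟨i, hi, hh⟩)
      · exact Or.inl (Or.inl h)
      · rcases List.mem_cons.mp hi with rfl | hi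
        · exact Or.inl (Or.inr hh)
        · exact Or.inr ⟨i, hi, hh⟩

theorem pyRange_len_cast (l : List (List String)) :
    PySem.List.pyRange 0 (PySem.List.len l) 1 =
      (List.range l.length).map (fun (k : ℕ) => (k : Int)) := by
  rw [PySem.List.pyRange_one]
  simp only [PySem.List.len_eq, sub_zero, Int.toNat_natCast]
  exact List.map_congr_left fun k _ => by simp

theorem filter_map_cast {α : Type} (n : ℕ) (pd : ℤ → Bool) (q : ℕ → Bool)
    (f : ℤ → α) (g : ℕ → α)
    (h1 : ∀ k, k < n → pd (k : ℤ) = q k) (h2 : ∀ k, k < n → f (k : ℤ) = g k) :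
    (((List.range n).map (fun (k : ℕ) => (k : Int))).filter pd).map f =
      ((List.range n).filter q).map g := by
  rw [List.filter_map, List.map_map]
  rw [List.filter_congr (fun k hk => by
    simpa using h1 k (List.mem_range.mp hk))]
  apply List.map_congr_left
  intro k hk
  have hkn : k < n := List.mem_range.mp (List.mem_of_mem_filter hk)
  simpa using h2 k hkn

-- A's output, characterized: keep index i iff no removal condition fires
theorem removeRedundantSchemas_eq_filter (l : List (List String)) :
    removeRedundantSchemas l =
      ((List.range l.length).filter (pvKeep l)).map (fun i => l.getD i []) := by
  unfold removeRedundantSchemas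
  simp only [PySem.List.foldl_append_ite]
  rw [List.nil_append, pyRange_len_cast]
  apply filter_map_cast
  · intro k hk
    cases hany : (List.range l.length).any (pvCnd l k) with
    | false =>
      have : pvKeep l k = true := by unfold pvKeep; rw [hany]; rfl
      rw [this]
      simp only [decide_eq_true_eq]
      rw [PySem.Set.contains_iff, mem_foldl_outer2]
      rintro (hin | ⟨i', hi', ⟨j, hj, hpq⟩, hk'⟩)
      · simp [PySem.Set.empty] at hin
      · rcases List.mem_map.mp hi' with ⟨ki, hki, rfl⟩
        rcases List.mem_map.mp hj with ⟨kj, hkj, rfl⟩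
        have hkk : k = ki := by exact_mod_cast hk'
        subst hkk
        have hcnd : pvCnd l k kj = true := (cnd_bridge l k kj).mp hpq
        exact List.any_eq_false.mp hany kj hkj hcnd
    | true =>
      have : pvKeep l k = false := by unfold pvKeep; rw [hany]; rfl
      rw [this]
      simp only [decide_eq_false_iff_not, not_not]
      rw [PySem.Set.contains_iff, mem_foldl_outer2]
      rcases List.any_eq_true.mp hany with ⟨j, hj, hcnd⟩
      exact Or.inr ⟨(k : ℤ), List.mem_map.mpr ⟨k, List.mem_range.mpr hk, rfl⟩,
        ⟨(j : ℤ), List.mem_map.mpr ⟨j, hj, rfl⟩, (cnd_bridge l k j).mpr hcnd⟩, rfl⟩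
  · intro k hk
    simp

theorem pvStepB_pos (K : List (List String)) (a : List String)
    (h : K.any (fun t => PySem.Set.issubset a t) = true) : pvStepB K a = K := by
  unfold pvStepB
  rw [h]
  simp

theorem pvStepB_neg (K : List (List String)) (a : List String)
    (h : K.any (fun t => PySem.Set.issubset a t) = false) :
    pvStepB K a = K.filter (fun t => !(pySetLt t a)) ++ [a] := by
  unfold pvStepB
  rw [h]
  simp

-- ---- B's loop, characterized by the same filter (plus a domination invariant) ----
theorem pvB_char (l : List (List String)) :
    (l.foldl pvStepB []) = ((List.range l.length).filter (pvKeep l)).map (fun i => l.getD i []) ∧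
      (∀ j, j < l.length → ∃ i, i < l.length ∧ pvKeep l i = true ∧
        pvSub (l.getD j []) (l.getD i [])) := by
  induction l using List.reverseRecOn with
  | nil => exact ⟨rfl, fun j hj => absurd hj (by simp)⟩
  | append_singleton l' a ih =>
    obtain ⟨ihEq, ihDom⟩ := ih
    have hlen : (l' ++ [a]).length = l'.length + 1 := by simp
    have hgetOld : ∀ i, i < l'.length → (l' ++ [a]).getD i [] = l'.getD i [] := by
      intro i hi
      rw [List.getD_eq_getElem?_getD, List.getD_eq_getElem?_getD, List.getElem?_append_left hi]
    have hgetNew : (l' ++ [a]).getD l'.length [] = a := by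
      rw [List.getD_eq_getElem?_getD, List.getElem?_append_right (le_refl _)]
      simp
    -- the new keep-predicate, restricted to old indices
    have hkOld : ∀ i, i < l'.length →
        (pvKeep (l' ++ [a]) i = true ↔
          pvKeep l' i = true ∧ ¬ pvLt (l'.getD i []) a) := by
      intro i hi
      rw [pvKeep_iff _ i (by omega), pvKeep_iff l' i hi]
      constructor
      · rintro ⟨h1, h2⟩
        refine ⟨⟨fun j hj => ?_, fun j hj => ?_⟩, ?_⟩
        · have := h1 j (by omega)
          rwa [hgetOld i hi, hgetOld j hj] at this
        · have := h2 j hj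
          rwa [hgetOld i hi, hgetOld j (by omega)] at this
        · have := h1 l'.length (by omega)
          rwa [hgetOld i hi, hgetNew] at this
      · rintro ⟨⟨h1, h2⟩, h3⟩
        constructor
        · intro j hj
          rw [hgetOld i hi]
          by_cases hjl : j < l'.length
          · rw [hgetOld j hjl]; exact h1 j hjl
          · have : j = l'.length := by rw [hlen] at hj; omega
            subst this
            rw [hgetNew]; exact h3
        · intro j hj
          rw [hgetOld i hi, hgetOld j (by omega)]
          exact h2 j hj
    -- the new keep-predicate at the new index
    have hkNew : (pvKeep (l' ++ [a]) l'.length = true ↔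
        (∀ j, j < l'.length → ¬ pvLt a (l'.getD j [])) ∧
          (∀ j, j < l'.length → ¬ pvEqv a (l'.getD j []))) := by
      rw [pvKeep_iff _ l'.length (by omega)]
      constructor
      · rintro ⟨h1, h2⟩
        constructor
        · intro j hj
          have := h1 j (by omega)
          rwa [hgetNew, hgetOld j hj] at this
        · intro j hj
          have := h2 j hj
          rwa [hgetNew, hgetOld j hj] at this
      · rintro ⟨h1, h2⟩
        constructor
        · intro j hj
          rw [hgetNew]
          by_cases hjl : j < l'.length
          · rw [hgetOld j hjl]; exact h1 j hjl
          · have : j = l'.length := by rw [hlen] at hj; omega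
            subst this
            rw [hgetNew]; exact pvLt_irrefl a
        · intro j hj
          rw [hgetNew, hgetOld j hj]
          exact h2 j hj
    -- membership in the old kept list
    have hmemKept : ∀ t, t ∈ l'.foldl pvStepB [] ↔
        ∃ i, i < l'.length ∧ pvKeep l' i = true ∧ l'.getD i [] = t := by
      intro t
      rw [ihEq]
      constructor
      · intro ht
        rcases List.mem_map.mp ht with ⟨i, hi, rfl⟩
        have h1 := List.mem_filter.mp hi
        exact ⟨i, List.mem_range.mp h1.1, h1.2, rfl⟩
      · rintro ⟨i, hi, hk, rfl⟩
        exact List.mem_map.mpr ⟨i, List.mem_filter.mpr ⟨List.mem_range.mpr hi, hk⟩, rfl⟩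
    rw [List.foldl_append, List.foldl_cons, List.foldl_nil]
    cases hc : (l'.foldl pvStepB []).any (fun t => PySem.Set.issubset a t) with
    | true =>
      -- a is contained in a survivor: kept unchanged, index l'.length not kept
      rw [pvStepB_pos _ _ hc]
      rcases List.any_eq_true.mp hc with ⟨t, htmem, hsub⟩
      rcases (hmemKept t).mp htmem with ⟨i0, hi0, hk0, rfl⟩
      have hsub' : pvSub a (l'.getD i0 []) := (pvSub_bridge _ _).mp hsub
      have hkeep0 := (pvKeep_iff l' i0 hi0).mp hk0
      -- no surviving old set is a proper subset of a
      have hnolt : ∀ i, i < l'.length → pvKeep l' i = true → ¬ pvLt (l'.getD i []) a := by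
        intro i hi hk hlt
        exact (pvKeep_iff l' i hi).mp hk |>.1 i0 hi0 (pvLt_of_lt_of_sub hlt hsub')
      have hnewFalse : pvKeep (l' ++ [a]) l'.length = false := by
        cases hv : pvKeep (l' ++ [a]) l'.length
        · rfl
        · exfalso
          rcases pvSub_cases hsub' with hlt | heq
          · exact (hkNew.mp hv).1 i0 hi0 hlt
          · exact (hkNew.mp hv).2 i0 hi0 heq
      have hsame : ∀ i ∈ List.range l'.length, pvKeep (l' ++ [a]) i = pvKeep l' i := by
        intro i hi
        have hil := List.mem_range.mp hi
        apply pvBoolExt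
        rw [hkOld i hil]
        constructor
        · exact fun h => h.1
        · intro h
          exact ⟨h, hnolt i hil h⟩
      constructor
      · rw [ihEq, hlen, List.range_succ, List.filter_append, List.map_append]
        rw [List.filter_congr hsame]
        have : List.filter (pvKeep (l' ++ [a])) [l'.length] = [] := by
          simp [List.filter, hnewFalse]
        rw [this, List.map_nil, List.append_nil]
        apply List.map_congr_left
        intro i hi
        have hil := List.mem_range.mp (List.mem_of_mem_filter hi)
        rw [hgetOld i hil]
      · intro j hj
        rw [hlen] at hj
        by_cases hjl : j < l'.length
        · rcases ihDom j hjl with ⟨i, hi, hk, hs⟩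
          refine ⟨i, by omega, ?_, ?_⟩
          · rw [hkOld i hi]
            exact ⟨hk, hnolt i hi hk⟩
          · rwa [hgetOld j hjl, hgetOld i hi]
        · have : j = l'.length := by omega
          subst this
          refine ⟨i0, by omega, ?_, ?_⟩
          · rw [hkOld i0 hi0]
            exact ⟨hk0, hnolt i0 hi0 hk0⟩
          · rwa [hgetNew, hgetOld i0 hi0]
    | false =>
      -- a survives: it evicts the survivors that are proper subsets of it
      rw [pvStepB_neg _ _ hc]
      have hnosub : ∀ i, i < l'.length → pvKeep l' i = true → ¬ pvSub a (l'.getD i []) := by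
        intro i hi hk hs
        have : (l'.foldl pvStepB []).any (fun t => PySem.Set.issubset a t) = true :=
          List.any_eq_true.mpr ⟨l'.getD i [], (hmemKept _).mpr ⟨i, hi, hk, rfl⟩,
            (pvSub_bridge _ _).mpr hs⟩
        simp [hc] at this
      have hnewTrue : pvKeep (l' ++ [a]) l'.length = true := by
        rw [hkNew]
        constructor
        · intro j hj hlt
          rcases ihDom j hj with ⟨i, hi, hk, hs⟩
          exact hnosub i hi hk (pvSub_trans hlt.1 hs)
        · intro j hj heq
          rcases ihDom j hj with ⟨i, hi, hk, hs⟩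
          exact hnosub i hi hk (pvSub_trans (pvSub_of_eqv heq) hs)
      have hkOldB : ∀ i ∈ List.range l'.length,
          (pvKeep l' i && !(pySetLt (l'.getD i []) a)) = pvKeep (l' ++ [a]) i := by
        intro i hi
        have hil := List.mem_range.mp hi
        apply pvBoolExt
        rw [Bool.and_eq_true, hkOld i hil]
        constructor
        · rintro ⟨h1, h2⟩
          refine ⟨h1, fun hlt => ?_⟩
          rw [(pvLt_bridge _ _).mpr hlt] at h2
          cases h2
        · rintro ⟨h1, h2⟩
          refine ⟨h1, ?_⟩
          cases hv : pySetLt (l'.getD i []) a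
          · rfl
          · exact absurd ((pvLt_bridge _ _).mp hv) h2
      constructor
      · rw [ihEq, hlen, List.range_succ, List.filter_append, List.map_append]
        have hlast : List.filter (pvKeep (l' ++ [a])) [l'.length] = [l'.length] := by
          simp [List.filter, hnewTrue]
        rw [hlast, List.map_singleton, hgetNew]
        rw [List.filter_map, List.filter_filter]
        rw [List.filter_congr (fun i hi => by
          simpa [Bool.and_comm] using hkOldB i hi)]
        refine congrArg (· ++ [a]) ?_
        apply List.map_congr_left
        intro i hi
        have hil := List.mem_range.mp (List.mem_of_mem_filter hi)
        rw [hgetOld i hil]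
      · intro j hj
        rw [hlen] at hj
        by_cases hjl : j < l'.length
        · rcases ihDom j hjl with ⟨i, hi, hk, hs⟩
          by_cases hlt : pvLt (l'.getD i []) a
          · refine ⟨l'.length, by omega, hnewTrue, ?_⟩
            rw [hgetOld j hjl, hgetNew]
            exact pvSub_trans hs hlt.1
          · refine ⟨i, by omega, ?_, ?_⟩
            · rw [hkOld i hi]; exact ⟨hk, hlt⟩
            · rwa [hgetOld j hjl, hgetOld i hi]
        · have : j = l'.length := by omega
          subst this
          exact ⟨l'.length, by omega, hnewTrue, by rw [hgetNew]; exact pvSub_refl a⟩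

-- ===== VERDICT (by name: the statement is the Claim_ definition above) =====
theorem removeRedundantSchemas_spec : Claim_equal_removeRedundantSchemas := by
  intro relations _
  unfold Spec_removeRedundantSchemas removeRedundantSchemas_alt
  rw [removeRedundantSchemas_eq_filter, (pvB_char relations).1]
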